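-- pv_equiv track=rewrite | github.com/timiv/helixscreen | scripts/generate_translations.py | find_missing_translations
-- ===== SOURCE A (Python) =====
-- from typing import Any
--
-- def find_missing_translations(
--     translations: dict[str, dict[str, Any]],
--     base_locale: str = "en",
-- ) -> dict[str, list[str]]:
--     """
--     Find translations missing from non-base locales.
--
--     Args:
--         translations: Dict of {locale: {key: value, ...}, ...}
--         base_locale: The base locale to compare against (default: "en")
--
--     Returns:
--         Dict of {locale: [missing_key, ...], ...}
--     """
--     if base_locale not in translations:
--         return {}
--
--     base_keys = set(translations[base_locale].keys())
--     missing = {}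
--
--     for locale, locale_translations in translations.items():
--         if locale == base_locale:
--             continue
--
--         locale_keys = set(locale_translations.keys())
--         missing_keys = base_keys - locale_keys
--
--         if missing_keys:
--             missing[locale] = sorted(missing_keys)
--
--     return missing
-- ===== SOURCE B (Python) =====
-- def find_missing_translations(
--     translations,
--     base_locale="en",
-- ):
--     """Inverted-loop strategy: initialise an empty missing-list per non-base
--     locale, then walk the base locale's keys in sorted order ONCE, appending
--     each key to every locale that lacks it; finally drop empty lists."""
--     if base_locale not in translations:
--         return {}
--     acc = {loc: [] for loc in translations if loc != base_locale}
--     for key in sorted(translations[base_locale]):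
--         for loc, locale_translations in translations.items():
--             if loc != base_locale and key not in locale_translations:
--                 acc[loc].append(key)
--     return {loc: keys for loc, keys in acc.items() if keys}
-- ===== Notes on version B (the rewrite author's own statement) =====
-- stated objective: alternative
-- what changed: Inverts the loop nesting: instead of computing a set difference and sorting it per locale, B initialises an empty missing-list per non-base locale, walks the base locale's keys once in sorted order appending each key to every locale that lacks it, and finally drops the locales whose list stayed empty.
import Mathlib
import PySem

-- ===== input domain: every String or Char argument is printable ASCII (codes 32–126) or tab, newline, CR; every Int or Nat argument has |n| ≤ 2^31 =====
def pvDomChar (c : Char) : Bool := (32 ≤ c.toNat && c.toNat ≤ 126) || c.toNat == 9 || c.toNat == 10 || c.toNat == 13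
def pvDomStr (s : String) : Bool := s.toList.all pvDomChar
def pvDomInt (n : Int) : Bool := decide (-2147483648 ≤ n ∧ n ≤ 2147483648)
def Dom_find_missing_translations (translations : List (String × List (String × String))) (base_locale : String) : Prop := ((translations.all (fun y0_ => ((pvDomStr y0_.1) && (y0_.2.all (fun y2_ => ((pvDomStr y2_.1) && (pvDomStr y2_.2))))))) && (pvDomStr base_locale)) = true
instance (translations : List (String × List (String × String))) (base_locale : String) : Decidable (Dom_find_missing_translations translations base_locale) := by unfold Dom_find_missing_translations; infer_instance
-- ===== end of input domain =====

-- B inverts A's loop nesting: instead of a per-locale set-difference-then-sort, it walks the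
-- base locale's keys in sorted order once, appending each key to the accumulator list of every
-- locale that lacks it, and finally drops the locales whose list stayed empty (alternative).

-- ===== PORT A =====
-- dicts are association lists (insertion order); 'keys' of a dict are the distinct first components.
def find_missing_translations (translations : List (String × List (String × String))) (base_locale : String) : List (String × List String) :=
  if !(translations.map Prod.fst).contains base_locale then []
  else
    let base_keys : PySem.Set String :=
      PySem.Set.ofList (((translations.lookup base_locale).getD []).map Prod.fst)
    translations.foldl (fun missing p =>
      if p.1 == base_locale then missing
      else
        let locale_keys : PySem.Set String := PySem.Set.ofList (p.2.map Prod.fst)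
        let missing_keys : PySem.Set String := PySem.Set.diff base_keys locale_keys
        if missing_keys.isEmpty then missing
        else missing ++ [(p.1, PySem.List.sorted missing_keys (fun x => x) false)]) []

-- ===== PORT B =====
def find_missing_translations_alt (translations : List (String × List (String × String))) (base_locale : String) : List (String × List String) :=
  if !(translations.map Prod.fst).contains base_locale then []
  else
    -- acc = {loc: [] for loc in translations if loc != base_locale}
    let acc0 : PySem.Dict String (List String) :=
      translations.foldl (fun d p =>
        if p.1 == base_locale then d else d.insert p.1 []) PySem.Dict.empty
    -- for key in sorted(translations[base_locale]): …  (dict iteration = distinct keys)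
    let ordered := PySem.List.sorted
      (PySem.List.dedup (((translations.lookup base_locale).getD []).map Prod.fst)) (fun x => x) false
    let acc := ordered.foldl (fun d k =>
      translations.foldl (fun d p =>
        if p.1 != base_locale && !(p.2.map Prod.fst).contains k
        then d.modify p.1 [] (fun l => l ++ [k]) else d) d) acc0
    -- {loc: keys for loc, keys in acc.items() if keys}
    acc.items.filter (fun q => !q.2.isEmpty)

-- ===== PRECONDITION & SPEC =====
-- Pre_ requires the locales (outer keys) to be pairwise distinct: a Python dict cannot carry
-- duplicate keys, so this excludes only association lists that represent no Python input.
def Pre_find_missing_translations (translations : List (String × List (String × String))) (base_locale : String) : Prop :=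
  (translations.map Prod.fst).Nodup
instance (translations : List (String × List (String × String))) (base_locale : String) : Decidable (Pre_find_missing_translations translations base_locale) := by unfold Pre_find_missing_translations; infer_instance
def pvWitness_find_missing_translations : (List (String × List (String × String))) × String :=
  ([("en", [("a", "1"), ("b", "2")]), ("fr", [("a", "x")])], "en")
def Spec_find_missing_translations (translations : List (String × List (String × String))) (base_locale : String) (out : List (String × List String)) : Prop := out = find_missing_translations_alt translations base_locale
instance (translations : List (String × List (String × String))) (base_locale : String) (out : List (String × List String)) : Decidable (Spec_find_missing_translations translations base_locale out) := by unfold Spec_find_missing_translations; infer_instance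

-- ===== CLAIM (what is proved, stated in full; the proofs are below) =====
def Claim_equal_find_missing_translations : Prop := ∀ (translations : List (String × List (String × String))) (base_locale : String), Dom_find_missing_translations translations base_locale → Pre_find_missing_translations translations base_locale → Spec_find_missing_translations translations base_locale (find_missing_translations translations base_locale)

-- ===== LEMMAS AND PROOFS =====

lemma isEmpty_sorted (xs : List String) :
    (PySem.List.sorted xs (fun x => x) false).isEmpty = xs.isEmpty := by
  have h := PySem.List.length_sorted (xs := xs) (key := fun x : String => x) (rev := false)
  cases hs : PySem.List.sorted xs (fun x => x) false <;> cases hx : xs <;>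
    subst hx <;> rw [hs] at h <;> simp_all

lemma contains_ofList {α : Type} [BEq α] [LawfulBEq α] (ls : List α) (x : α) :
    (PySem.Set.ofList ls).contains x = ls.contains x := by
  by_cases h : x ∈ ls
  · simp [PySem.Set.contains, (PySem.Set.mem_ofList ls x).2 h, h]
  · simp [PySem.Set.contains, h, mt (PySem.Set.mem_ofList ls x).1 h]

-- A's per-locale sorted set difference equals a filtered pass over the pre-sorted base keys
lemma core (ks ls : List String) :
    PySem.List.sorted (PySem.Set.diff (PySem.Set.ofList ks) (PySem.Set.ofList ls)) (fun x => x) false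
      = (PySem.List.sorted (PySem.List.dedup ks) (fun x => x) false).filter
          (fun k => !ls.contains k) := by
  have hd : PySem.Set.diff (PySem.Set.ofList ks) (PySem.Set.ofList ls)
      = (PySem.List.dedup ks).filter (fun k => !ls.contains k) := by
    simp only [PySem.Set.diff, PySem.List.dedup_eq_ofList]
    exact List.filter_congr (fun x _ => by rw [contains_ofList])
  rw [hd]
  apply PySem.List.sorted_eq_of_perm_of_pairwise_lt
  · exact (PySem.List.sorted_perm _ _ _).filter _
  · have := PySem.List.sorted_ofList_pairwise_lt (xs := ks)
    rw [← PySem.List.dedup_eq_ofList] at this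
    exact this.filter _

-- A's fold with per-locale set machinery rewritten into the filtered-list form
lemma fold_eq (translations : List (String × List (String × String))) (base_locale : String)
    (ks : List String) (acc : List (String × List String)) :
    translations.foldl (fun missing p =>
      if p.1 == base_locale then missing
      else
        let locale_keys : PySem.Set String := PySem.Set.ofList (p.2.map Prod.fst)
        let missing_keys : PySem.Set String :=
          PySem.Set.diff (PySem.Set.ofList ks) locale_keys
        if missing_keys.isEmpty then missing
        else missing ++ [(p.1, PySem.List.sorted missing_keys (fun x => x) false)]) acc
    = translations.foldl (fun missing p =>
      if p.1 == base_locale then missing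
      else
        let missing_list := (PySem.List.sorted (PySem.List.dedup ks) (fun x => x) false).filter
          (fun k => !(p.2.map Prod.fst).contains k)
        if missing_list.isEmpty then missing
        else missing ++ [(p.1, missing_list)]) acc := by
  induction translations generalizing acc with
  | nil => rfl
  | cons p t ih =>
    simp only [List.foldl_cons]
    by_cases hb : p.1 == base_locale
    · rw [if_pos hb, if_pos hb]; exact ih _
    · rw [if_neg hb, if_neg hb]
      have hc := core ks (p.2.map Prod.fst)
      have hEmp : (PySem.Set.diff (PySem.Set.ofList ks)
          (PySem.Set.ofList (p.2.map Prod.fst))).isEmpty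
          = ((PySem.List.sorted (PySem.List.dedup ks) (fun x => x) false).filter
              (fun k => !(p.2.map Prod.fst).contains k)).isEmpty := by
        rw [← hc, isEmpty_sorted]
      simp only [hEmp, hc]
      exact ih _

lemma lookup_nodup {β : Type} {l : List (String × β)} (h : (l.map Prod.fst).Nodup)
    {p : String × β} (hp : p ∈ l) : l.lookup p.1 = some p.2 := by
  induction l with
  | nil => cases hp
  | cons q t ih =>
    rcases List.mem_cons.1 hp with rfl | hpt
    · simp [List.lookup]
    · have hq : q.1 ∉ t.map Prod.fst := (List.nodup_cons.1 (by simpa using h)).1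
      have hne : (p.1 == q.1) = false := by
        refine beq_eq_false_iff_ne.2 (fun he => hq ?_)
        exact he ▸ List.mem_map.2 ⟨p, hpt, rfl⟩
      simp only [List.lookup, hne]
      exact ih (List.nodup_cons.1 (by simpa using h)).2 hpt

lemma lookup_not_mem {β : Type} {l : List (String × β)} {a : String}
    (h : a ∉ l.map Prod.fst) : l.lookup a = none := by
  induction l with
  | nil => rfl
  | cons q t ih =>
    simp only [List.map_cons, List.mem_cons, not_or] at h
    have hne : (a == q.1) = false := beq_eq_false_iff_ne.2 h.1
    simp only [List.lookup, hne]
    exact ih h.2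

lemma modify_eq_insert (d : PySem.Dict String (List String)) (k : String)
    (dflt : List String) (f : List String → List String) :
    d.modify k dflt f = d.insert k (f (d.getD k dflt)) := by
  simp [PySem.Dict.modify]

lemma items_modify_nodup (d : PySem.Dict String (List String)) (k : String)
    (f : List String → List String) (hn : d.keys.Nodup) (hc : d.contains k = true) :
    (d.modify k [] f).items = d.items.map (fun q => if q.1 == k then (q.1, f q.2) else q) := by
  rw [modify_eq_insert, PySem.Dict.items_insert_of_contains _ _ hc]
  refine List.map_congr_left (fun q hq => ?_)
  by_cases hk : (q.1 == k) = true
  · have hkey : q.1 = k := eq_of_beq hk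
    have hmem : (k, q.2) ∈ d.items := by rw [← hkey]; exact hq
    have := PySem.Dict.getD_of_mem_items d hmem hn []
    simp [hkey, this]
  · simp [hk]

-- the entrywise action of pushing one key k through the locale list
def markFn (base_locale k : String) (ts : List (String × List (String × String)))
    (q : String × List String) : String × List String :=
  match ts.lookup q.1 with
  | some lt => if q.1 != base_locale && !(lt.map Prod.fst).contains k
               then (q.1, q.2 ++ [k]) else q
  | none => q

lemma markFn_some {base_locale k : String} {ts : List (String × List (String × String))}
    {q : String × List String} {lt : List (String × String)} (h : ts.lookup q.1 = some lt) :
    markFn base_locale k ts q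
      = if q.1 != base_locale && !(lt.map Prod.fst).contains k then (q.1, q.2 ++ [k]) else q := by
  simp [markFn, h]

lemma markFn_none {base_locale k : String} {ts : List (String × List (String × String))}
    {q : String × List String} (h : ts.lookup q.1 = none) :
    markFn base_locale k ts q = q := by
  simp [markFn, h]

lemma markFn_cons_ne {base_locale k : String} {p : String × List (String × String)}
    {t : List (String × List (String × String))} {q : String × List String}
    (h : (q.1 == p.1) = false) :
    markFn base_locale k (p :: t) q = markFn base_locale k t q := by
  simp [markFn, List.lookup, h]

-- one key k pushed through the whole locale list: each stored list gains k exactly when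
-- that locale lacks k (entrywise action of the inner fold on the accumulator dict)
lemma inner_fold (base_locale k : String) :
    ∀ (ts : List (String × List (String × String))) (d : PySem.Dict String (List String)),
    (ts.map Prod.fst).Nodup → d.keys.Nodup →
    (∀ p ∈ ts, p.1 ≠ base_locale → d.contains p.1 = true) →
    (ts.foldl (fun d p =>
        if p.1 != base_locale && !(p.2.map Prod.fst).contains k
        then d.modify p.1 [] (fun l => l ++ [k]) else d) d).items
      = d.items.map (markFn base_locale k ts) := by
  intro ts
  induction ts with
  | nil =>
    intro d _ _ _
    have hmap : List.map (markFn base_locale k []) d.items = List.map id d.items :=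
      List.map_congr_left (fun q _ => markFn_none rfl)
    rw [hmap, List.map_id]
    rfl
  | cons p t ih =>
    intro d hts hd hcont
    have htn : (t.map Prod.fst).Nodup := (List.nodup_cons.1 (by simpa using hts)).2
    have hpt : p.1 ∉ t.map Prod.fst := (List.nodup_cons.1 (by simpa using hts)).1
    simp only [List.foldl_cons]
    by_cases hc : (p.1 != base_locale && !(p.2.map Prod.fst).contains k) = true
    · -- the head locale lacks k: its entry gains k, the rest proceed
      have hpb : p.1 ≠ base_locale := by
        have h1 := ((Bool.and_eq_true _ _).mp hc).1
        simpa using h1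
      have hcp : d.contains p.1 = true := hcont p (List.mem_cons_self ..) hpb
      have hitems := items_modify_nodup d p.1 (fun l => l ++ [k]) hd hcp
      have hkeys : (d.modify p.1 [] (fun l => l ++ [k])).keys = d.keys := by
        rw [PySem.Dict.keys_modify, PySem.Dict.keys_insert_of_contains _ _ hcp]
      rw [if_pos hc, ih _ htn (by rw [hkeys]; exact hd)
        (fun q hq hqb => by
          rw [PySem.Dict.contains_modify]
          simp [hcont q (List.mem_cons_of_mem _ hq) hqb]),
        hitems, List.map_map]
      refine List.map_congr_left (fun q _ => ?_)
      simp only [Function.comp_def]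
      by_cases hk : (q.1 == p.1) = true
      · have hkey : q.1 = p.1 := eq_of_beq hk
        have hnone : t.lookup q.1 = none := lookup_not_mem (by rw [hkey]; exact hpt)
        have hsome : (p :: t).lookup q.1 = some p.2 := by
          simp [List.lookup, hk]
        rw [if_pos hk, markFn_none (q := (q.1, q.2 ++ [k])) hnone,
          markFn_some hsome]
        rw [hkey, if_pos hc]
      · rw [if_neg (by simp [hk]), markFn_cons_ne (Bool.eq_false_iff.2 hk)]
    · -- the head locale has k (or is the base): nothing changes for it
      rw [if_neg hc, ih _ htn hd
        (fun q hq hqb => hcont q (List.mem_cons_of_mem _ hq) hqb)]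
      refine List.map_congr_left (fun q _ => ?_)
      by_cases hk : (q.1 == p.1) = true
      · have hkey : q.1 = p.1 := eq_of_beq hk
        have hnone : t.lookup q.1 = none := lookup_not_mem (by rw [hkey]; exact hpt)
        have hsome : (p :: t).lookup q.1 = some p.2 := by
          simp [List.lookup, hk]
        rw [markFn_none hnone, markFn_some hsome, hkey,
          if_neg (by simpa using hc)]
      · rw [markFn_cons_ne (Bool.eq_false_iff.2 hk)]

-- the whole sorted key list pushed through: each locale's list is the filtered key list
lemma outer_fold (translations : List (String × List (String × String))) (base_locale : String)
    (hN : (translations.map Prod.fst).Nodup) :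
    ∀ (ks : List String) (g : (String × List (String × String)) → List String)
      (d : PySem.Dict String (List String)),
    d.items = (translations.filter (fun p => !(p.1 == base_locale))).map (fun p => (p.1, g p)) →
    (ks.foldl (fun d k =>
        translations.foldl (fun d p =>
          if p.1 != base_locale && !(p.2.map Prod.fst).contains k
          then d.modify p.1 [] (fun l => l ++ [k]) else d) d) d).items
      = (translations.filter (fun p => !(p.1 == base_locale))).map
          (fun p => (p.1, g p ++ ks.filter (fun k => !(p.2.map Prod.fst).contains k))) := by
  intro ks
  induction ks with
  | nil => intro g d hd; simpa using hd
  | cons k ks ih =>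
    intro g d hd
    have hkeys : d.keys = (translations.filter (fun p => !(p.1 == base_locale))).map Prod.fst := by
      show d.items.map Prod.fst = _
      rw [hd, List.map_map]; rfl
    have hdn : d.keys.Nodup := by
      rw [hkeys]
      exact (List.filter_sublist.map Prod.fst).nodup hN
    have hstep := inner_fold base_locale k translations d hN hdn
      (fun p hp hpb => by
        rw [PySem.Dict.contains_iff_mem_keys, hkeys]
        exact List.mem_map.2 ⟨p, List.mem_filter.2 ⟨hp, by simpa using hpb⟩, rfl⟩)
    simp only [List.foldl_cons]
    rw [ih (fun p => g p ++ if !(p.2.map Prod.fst).contains k then [k] else []) _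
      (by
        rw [hstep, hd, List.map_map]
        refine List.map_congr_left (fun p hp => ?_)
        have hpmem : p ∈ translations := List.mem_of_mem_filter hp
        have hpb : (!(p.1 == base_locale)) = true := (List.mem_filter.1 hp).2
        have hb1 : (p.1 != base_locale) = true := hpb
        have hlk : translations.lookup p.1 = some p.2 := lookup_nodup hN hpmem
        simp only [Function.comp_def]
        rw [markFn_some (q := (p.1, g p)) hlk]
        cases hck : (p.2.map Prod.fst).contains k with
        | true => rw [if_neg (by simp [hb1])]; simp
        | false => rw [if_pos (by simp [hb1])]; simp)]
    refine List.map_congr_left (fun p _ => ?_)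
    rw [List.filter_cons]
    cases hck : (p.2.map Prod.fst).contains k with
    | true =>
      rw [if_neg (by simp)]
      simp
    | false =>
      rw [if_pos (by simp)]
      simp

-- B's accumulator initialisation: one empty list per non-base locale, in order
lemma acc0_items (translations : List (String × List (String × String))) (base_locale : String)
    (hN : (translations.map Prod.fst).Nodup) :
    (translations.foldl (fun d p =>
        if p.1 == base_locale then d else d.insert p.1 ([] : List String)) PySem.Dict.empty).items
      = (translations.filter (fun p => !(p.1 == base_locale))).map (fun p => (p.1, [])) := by
  have hsplit : ∀ (l : List (String × List (String × String)))
      (d : PySem.Dict String (List String)),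
      l.foldl (fun d p => if p.1 == base_locale then d else d.insert p.1 ([] : List String)) d
        = (l.filter (fun p => !(p.1 == base_locale))).foldl
            (fun d p => d.insert p.1 ([] : List String)) d := by
    intro l
    induction l with
    | nil => intro d; rfl
    | cons p t ih =>
      intro d
      simp only [List.foldl_cons, List.filter_cons]
      by_cases hb : (p.1 == base_locale) = true
      · rw [if_pos hb, if_neg (by simp [hb])]
        exact ih d
      · rw [if_neg hb, if_pos (by simp [hb]), List.foldl_cons]
        exact ih _
  rw [hsplit]
  have hnodup : ((translations.filter (fun p => !(p.1 == base_locale))).map Prod.fst).Nodup :=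
    (List.filter_sublist.map Prod.fst).nodup hN
  have := PySem.Dict.items_foldl_insert_fresh
    (l := translations.filter (fun p => !(p.1 == base_locale)))
    (k := Prod.fst) (v := fun _ => ([] : List String)) (d := PySem.Dict.empty)
    (fun a _ => PySem.Dict.contains_empty ..) hnodup
  simpa using this

-- A's append-fold written as a filter of the entrywise map
lemma a_fold_filter (base_locale : String) (h : (String × List (String × String)) → List String) :
    ∀ (ts : List (String × List (String × String))) (acc : List (String × List String)),
    ts.foldl (fun missing p =>
        if p.1 == base_locale then missing
        else if (h p).isEmpty then missing
        else missing ++ [(p.1, h p)]) acc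
      = acc ++ ((ts.filter (fun p => !(p.1 == base_locale))).map (fun p => (p.1, h p))).filter
          (fun q => !q.2.isEmpty) := by
  intro ts
  induction ts with
  | nil => intro acc; simp
  | cons p t ih =>
    intro acc
    simp only [List.foldl_cons, List.filter_cons]
    by_cases hb : (p.1 == base_locale) = true
    · rw [if_pos hb, if_neg (by simp [hb])]
      exact ih acc
    · rw [if_neg hb, if_pos (show (!(p.1 == base_locale)) = true from by simp [hb]),
        List.map_cons, List.filter_cons]
      by_cases he : (h p).isEmpty = true
      · rw [if_pos he, if_neg (show ¬((!(p.1, h p).2.isEmpty) = true) from by simp [he])]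
        exact ih acc
      · rw [if_neg he, if_pos (show (!(p.1, h p).2.isEmpty) = true from by simp [he])]
        rw [ih]
        simp

-- ===== VERDICT (by name: the statement is the Claim_ definition above) =====
theorem find_missing_translations_spec : Claim_equal_find_missing_translations := by
  intro translations base_locale _ hN
  unfold Spec_find_missing_translations find_missing_translations find_missing_translations_alt
  by_cases hc : ((translations.map Prod.fst).contains base_locale) = true
  · rw [if_neg (show ¬((!(translations.map Prod.fst).contains base_locale) = true) from by
        rw [hc]; simp),
      if_neg (show ¬((!(translations.map Prod.fst).contains base_locale) = true) from by
        rw [hc]; simp)]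
    simp only [fold_eq translations base_locale
      (((translations.lookup base_locale).getD []).map Prod.fst) []]
    rw [a_fold_filter base_locale
      (fun p => (PySem.List.sorted
        (PySem.List.dedup (((translations.lookup base_locale).getD []).map Prod.fst))
        (fun x => x) false).filter (fun k => !(p.2.map Prod.fst).contains k)) translations []]
    rw [outer_fold translations base_locale hN _ (fun _ => []) _
      (acc0_items translations base_locale hN)]
    simp
  · have hc' : (translations.map Prod.fst).contains base_locale = false := Bool.eq_false_iff.2 hc
    rw [if_pos (show (!(translations.map Prod.fst).contains base_locale) = true from by
        rw [hc']; rfl),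
      if_pos (show (!(translations.map Prod.fst).contains base_locale) = true from by
        rw [hc']; rfl)]
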